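-- pv_equiv track=rewrite | github.com/saurabhjain17/dsa-problem-solving-for-100-days-of-code-and-self-practise | two_sum.py | indexi
-- ===== SOURCE A (Python) =====
-- def indexi(nums,left,right,x):
--     i=0
--     count=counti=0
--     flag=clag=-1
--     while (flag<0 or clag<0 or flag==clag) and i<len(nums):
--         if (count==1 and counti==1) and flag>-1 and clag>-1 and flag!=clag:
--             return(min(flag,clag),max(flag,clag))
--         if nums[i]==x[left] and count==0:
--             flag=i
--             count=1
--         elif nums[i]==x[right] and counti==0:
--             clag=i
--             counti=1
--         i+=1
--     if flag<clag:
--         return flag,clag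
--     elif flag>clag:
--         return clag,flag
-- ===== SOURCE B (Python) =====
-- def indexi(nums, left, right, x):
--     if not nums:
--         return None
--     a, b = x[left], x[right]
--     flag = nums.index(a) if a in nums else -1
--     if a == b:
--         rest = nums[flag + 1:]
--         clag = flag + 1 + rest.index(a) if flag >= 0 and a in rest else -1
--     else:
--         clag = nums.index(b) if b in nums else -1
--     if flag == clag:
--         return None
--     return (min(flag, clag), max(flag, clag))
-- ===== Notes on version B (the rewrite author's own statement) =====
-- stated objective: simpler
-- what changed: Replaces A's single interleaved state-machine scan (interpreted index loop with two found-counters and two sentinel flags) with direct library first-occurrence lookups (C-level list.index/in guarded by membership) plus one case split on whether the two target values are equal, taking the second occurrence when they are.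
-- outside the precondition, e.g. on indexi([2], 0, 1, [2]): A returns (-1, 0), B raises IndexError
import Mathlib
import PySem

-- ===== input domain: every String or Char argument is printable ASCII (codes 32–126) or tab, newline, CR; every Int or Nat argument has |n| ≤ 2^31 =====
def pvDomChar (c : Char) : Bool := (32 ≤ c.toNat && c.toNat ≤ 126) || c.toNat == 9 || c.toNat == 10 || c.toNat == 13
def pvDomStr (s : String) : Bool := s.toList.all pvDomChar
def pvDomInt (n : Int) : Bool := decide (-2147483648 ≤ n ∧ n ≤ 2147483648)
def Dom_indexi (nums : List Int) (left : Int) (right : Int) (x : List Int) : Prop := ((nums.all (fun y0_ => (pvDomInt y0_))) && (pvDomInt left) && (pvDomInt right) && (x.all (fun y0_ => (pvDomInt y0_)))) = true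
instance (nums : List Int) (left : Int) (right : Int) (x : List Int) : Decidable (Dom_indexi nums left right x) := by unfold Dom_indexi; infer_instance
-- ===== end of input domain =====

-- B replaces A's single interleaved state-machine scan (two found-flags, two counters)
-- with direct library first-occurrence lookups and one case split on whether the two
-- target values are equal (objective: simpler).

-- ===== PORT A =====
-- the trailing 'if flag<clag … elif flag>clag … (else implicit None)' of A
def indexiFin (flag clag : Int) : Option (Int × Int) :=
  if flag < clag then some (flag, clag)
  else if flag > clag then some (clag, flag)
  else none

-- A's while loop; fuel = nums.length - i (the loop body always increments i, so the
-- loop runs at most nums.length times; fuel 0 means i = len, where the condition fails).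
def indexiGo (nums : List Int) (left right : Int) (x : List Int) :
    Nat → Int → Int → Int → Int → Int → Option (Int × Int)
  | 0, _, _, _, flag, clag => indexiFin flag clag
  | fuel + 1, i, count, counti, flag, clag =>
    if (flag < 0 ∨ clag < 0 ∨ flag = clag) ∧ i < (nums.length : Int) then
      if ((count : Int) = 1 ∧ (counti : Int) = 1) ∧ flag > -1 ∧ clag > -1 ∧ flag ≠ clag then
        some (min flag clag, max flag clag)
      else if PySem.List.pyGet? nums i = PySem.List.pyGet? x left ∧ count = 0 then
        indexiGo nums left right x fuel (i + 1) 1 counti i clag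
      else if PySem.List.pyGet? nums i = PySem.List.pyGet? x right ∧ counti = 0 then
        indexiGo nums left right x fuel (i + 1) count 1 flag i
      else
        indexiGo nums left right x fuel (i + 1) count counti flag clag
    else
      indexiFin flag clag

def indexi (nums : List Int) (left : Int) (right : Int) (x : List Int) : Option (Int × Int) :=
  indexiGo nums left right x nums.length 0 0 0 (-1) (-1)

-- ===== PORT B =====
-- 'xs.index(v) if v in xs else -1' of Source B
def idxOrNeg (xs : List Int) (v : Int) : Int :=
  match PySem.List.index? xs v with
  | some n => (n : Int)
  | none => -1

def indexi_alt (nums : List Int) (left : Int) (right : Int) (x : List Int) : Option (Int × Int) :=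
  if nums = [] then none
  else
    match PySem.List.pyGet? x left, PySem.List.pyGet? x right with
    | some a, some b =>
      let flag : Int := idxOrNeg nums a
      let clag : Int :=
        if a = b then
          -- rest = nums[flag+1:]
          let rest := PySem.List.slice nums (some (flag + 1)) none
          -- 'flag + 1 + rest.index(a)' under the guard 'a in rest', where .index = idxOrNeg
          if flag ≥ 0 ∧ a ∈ rest then flag + 1 + idxOrNeg rest a else -1
        else idxOrNeg nums b
      if flag = clag then none else some (min flag clag, max flag clag)
    | _, _ => none  -- x[left]/x[right] raises IndexError in Source B; outside Pre_ (nums ≠ [] there)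

-- ===== PRECONDITION & SPEC =====
-- Pre_ excludes the inputs where A's x[left]/x[right] access is out of range and nums is
-- nonempty; A usually raises IndexError there, except when every scanned element is taken
-- by the x[left] branch so the lazy 'elif' never evaluates the out-of-range x[right] and A
-- still returns — B evaluates both up front and raises IndexError on all of them.
def Pre_indexi (nums : List Int) (left : Int) (right : Int) (x : List Int) : Prop :=
  nums = [] ∨ (PySem.Raise.InRange x.length left ∧ PySem.Raise.InRange x.length right)
instance (nums : List Int) (left : Int) (right : Int) (x : List Int) : Decidable (Pre_indexi nums left right x) := by unfold Pre_indexi; infer_instance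

def pvWitness_indexi : List Int × Int × Int × List Int := ([3, 1, 4, 1], 0, 1, [1, 4])

def Spec_indexi (nums : List Int) (left : Int) (right : Int) (x : List Int) (out : Option (Int × Int)) : Prop := out = indexi_alt nums left right x
instance (nums : List Int) (left : Int) (right : Int) (x : List Int) (out : Option (Int × Int)) : Decidable (Spec_indexi nums left right x out) := by unfold Spec_indexi; infer_instance

-- ===== CLAIM (what is proved, stated in full; the proofs are below) =====
def Claim_equal_indexi : Prop := ∀ (nums : List Int) (left : Int) (right : Int) (x : List Int), Dom_indexi nums left right x → Pre_indexi nums left right x → Spec_indexi nums left right x (indexi nums left right x)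

-- ===== LEMMAS AND PROOFS =====

-- first index ≥ i of v in nums, or -1 (the value A's scan leaves in flag/clag)
def ffrom (nums : List Int) (v : Int) (i : Nat) : Int :=
  match PySem.List.index? (nums.drop i) v with
  | some n => ((i + n : Nat) : Int)
  | none => -1

lemma ffrom_len (nums : List Int) (v : Int) : ffrom nums v nums.length = -1 := by
  simp [ffrom]

lemma ffrom_hit (nums : List Int) (v : Int) (i : Nat) (hi : i < nums.length)
    (h : nums[i] = v) : ffrom nums v i = (i : Int) := by
  have hdrop : nums.drop i = nums[i] :: nums.drop (i + 1) := List.drop_eq_getElem_cons hi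
  unfold ffrom
  rw [hdrop, h, PySem.List.index?_cons_self]
  simp

lemma ffrom_miss (nums : List Int) (v : Int) (i : Nat) (hi : i < nums.length)
    (h : nums[i] ≠ v) : ffrom nums v i = ffrom nums v (i + 1) := by
  have hdrop : nums.drop i = nums[i] :: nums.drop (i + 1) := List.drop_eq_getElem_cons hi
  unfold ffrom
  rw [hdrop, PySem.List.index?_cons_of_ne _ h]
  cases hx : PySem.List.index? (nums.drop (i + 1)) v <;> simp <;> push_cast <;> ring

lemma idxOrNeg_eq_ffrom_zero (nums : List Int) (v : Int) : idxOrNeg nums v = ffrom nums v 0 := by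
  unfold idxOrNeg ffrom
  rw [List.drop_zero]
  cases hx : PySem.List.index? nums v <;> simp

-- state (1,1): loop condition is false, the loop exits with indexiFin
lemma go_11 (nums : List Int) (left right : Int) (x : List Int) (fuel : Nat) (i f c : Int)
    (hf : 0 ≤ f) (hc : 0 ≤ c) (hne : f ≠ c) :
    indexiGo nums left right x fuel i 1 1 f c = indexiFin f c := by
  cases fuel with
  | zero => rfl
  | succ fuel =>
    have : ¬ ((f < 0 ∨ c < 0 ∨ f = c) ∧ i < (nums.length : Int)) := by
      rintro ⟨h1, -⟩; rcases h1 with h | h | h <;> omega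
    simp only [indexiGo]
    rw [if_neg this]

-- state (1,0): only the right-target branch is live; scans for x[right] from i
lemma go_10 (nums : List Int) (left right : Int) (x : List Int) (b : Int)
    (hb : PySem.List.pyGet? x right = some b) :
    ∀ fuel (i : Nat) (f : Int), fuel + i = nums.length → 0 ≤ f → f < (i : Int) →
    indexiGo nums left right x fuel (i : Int) 1 0 f (-1) = indexiFin f (ffrom nums b i) := by
  intro fuel
  induction fuel with
  | zero =>
    intro i f hlen _ _
    have : i = nums.length := by omega
    subst this
    simp [indexiGo, ffrom_len]
  | succ fuel ih =>
    intro i f hlen hf hfi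
    have hi : i < nums.length := by omega
    have hget : PySem.List.pyGet? nums (i : Int) = some nums[i] := by
      have h := PySem.List.pyGet?_eq_some_getElem nums (i := ((i : Nat) : Int)) (by omega) (by exact_mod_cast hi)
      simpa using h
    have hcond : ((f < 0 ∨ (-1 : Int) < 0 ∨ f = -1) ∧ (i : Int) < (nums.length : Int)) :=
      ⟨Or.inr (Or.inl (by omega)), by exact_mod_cast hi⟩
    have h1 : ¬ ((True ∧ (0 : Int) = 1) ∧ f > -1 ∧ (-1 : Int) > -1 ∧ f ≠ -1) := by
      rintro ⟨⟨-, h⟩, -⟩; omega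
    have h2 : ¬ (PySem.List.pyGet? nums (i : Int) = PySem.List.pyGet? x left ∧ (1 : Int) = 0) := by
      rintro ⟨-, h⟩; omega
    simp only [indexiGo]
    rw [if_pos hcond, if_neg h1, if_neg h2]
    by_cases hbeq : nums[i] = b
    · have heq : PySem.List.pyGet? nums (i : Int) = PySem.List.pyGet? x right := by
        rw [hget, hb, hbeq]
      rw [if_pos ⟨heq, trivial⟩,
        go_11 nums left right x fuel ((i : Int) + 1) f (i : Int) hf (by omega) (by omega),
        ffrom_hit nums b i hi hbeq]
    · have h3 : ¬ (PySem.List.pyGet? nums (i : Int) = PySem.List.pyGet? x right ∧ True) := by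
        rintro ⟨h, -⟩
        rw [hget, hb] at h
        exact hbeq (by simpa using h)
      rw [if_neg h3]
      have hcast : ((i : Int) + 1) = ((i + 1 : Nat) : Int) := by push_cast; ring
      rw [hcast, ih (i + 1) f (by omega) hf (by push_cast; omega), ffrom_miss nums b i hi hbeq]

-- state (0,1): only the left-target branch is live; scans for x[left] from i
lemma go_01 (nums : List Int) (left right : Int) (x : List Int) (a : Int)
    (ha : PySem.List.pyGet? x left = some a) :
    ∀ fuel (i : Nat) (c : Int), fuel + i = nums.length → 0 ≤ c → c < (i : Int) →
    indexiGo nums left right x fuel (i : Int) 0 1 (-1) c = indexiFin (ffrom nums a i) c := by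
  intro fuel
  induction fuel with
  | zero =>
    intro i c hlen _ _
    have : i = nums.length := by omega
    subst this
    simp [indexiGo, ffrom_len]
  | succ fuel ih =>
    intro i c hlen hc hci
    have hi : i < nums.length := by omega
    have hget : PySem.List.pyGet? nums (i : Int) = some nums[i] := by
      have h := PySem.List.pyGet?_eq_some_getElem nums (i := ((i : Nat) : Int)) (by omega) (by exact_mod_cast hi)
      simpa using h
    have hcond : (((-1 : Int) < 0 ∨ c < 0 ∨ (-1 : Int) = c) ∧ (i : Int) < (nums.length : Int)) :=
      ⟨Or.inl (by omega), by exact_mod_cast hi⟩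
    have h1 : ¬ (((0 : Int) = 1 ∧ True) ∧ (-1 : Int) > -1 ∧ c > -1 ∧ (-1 : Int) ≠ c) := by
      rintro ⟨⟨h, -⟩, -⟩; omega
    simp only [indexiGo]
    rw [if_pos hcond, if_neg h1]
    by_cases haeq : nums[i] = a
    · have heq : PySem.List.pyGet? nums (i : Int) = PySem.List.pyGet? x left := by
        rw [hget, ha, haeq]
      rw [if_pos ⟨heq, trivial⟩,
        go_11 nums left right x fuel ((i : Int) + 1) (i : Int) c (by omega) hc (by omega),
        ffrom_hit nums a i hi haeq]
    · have h2 : ¬ (PySem.List.pyGet? nums (i : Int) = PySem.List.pyGet? x left ∧ True) := by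
        rintro ⟨h, -⟩
        rw [hget, ha] at h
        exact haeq (by simpa using h)
      have h3 : ¬ (PySem.List.pyGet? nums (i : Int) = PySem.List.pyGet? x right ∧ (1 : Int) = 0) := by
        rintro ⟨-, h⟩; omega
      rw [if_neg h2, if_neg h3]
      have hcast : ((i : Int) + 1) = ((i + 1 : Nat) : Int) := by push_cast; ring
      rw [hcast, ih (i + 1) c (by omega) hc (by push_cast; omega), ffrom_miss nums a i hi haeq]

-- the final clag of A's scan started from state (0,0) at position i
def clagF (nums : List Int) (a b : Int) (i : Nat) : Int :=
  if a = b then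
    (if 0 ≤ ffrom nums a i then ffrom nums a ((ffrom nums a i).toNat + 1) else -1)
  else ffrom nums b i

lemma go_00 (nums : List Int) (left right : Int) (x : List Int) (a b : Int)
    (ha : PySem.List.pyGet? x left = some a) (hb : PySem.List.pyGet? x right = some b) :
    ∀ fuel (i : Nat), fuel + i = nums.length →
    indexiGo nums left right x fuel (i : Int) 0 0 (-1) (-1)
      = indexiFin (ffrom nums a i) (clagF nums a b i) := by
  intro fuel
  induction fuel with
  | zero =>
    intro i hlen
    have : i = nums.length := by omega
    subst this
    simp [indexiGo, clagF, ffrom_len]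
  | succ fuel ih =>
    intro i hlen
    have hi : i < nums.length := by omega
    have hget : PySem.List.pyGet? nums (i : Int) = some nums[i] := by
      have h := PySem.List.pyGet?_eq_some_getElem nums (i := ((i : Nat) : Int)) (by omega) (by exact_mod_cast hi)
      simpa using h
    have hcond : (((-1 : Int) < 0 ∨ (-1 : Int) < 0 ∨ True) ∧ (i : Int) < (nums.length : Int)) :=
      ⟨Or.inl (by omega), by exact_mod_cast hi⟩
    have h1 : ¬ (((0 : Int) = 1 ∧ (0 : Int) = 1) ∧ (-1 : Int) > -1 ∧ (-1 : Int) > -1 ∧ (-1 : Int) ≠ -1) := by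
      rintro ⟨⟨h, -⟩, -⟩; omega
    have hcast : ((i : Int) + 1) = ((i + 1 : Nat) : Int) := by push_cast; ring
    simp only [indexiGo]
    rw [if_pos hcond, if_neg h1]
    by_cases haeq : nums[i] = a
    · have heq : PySem.List.pyGet? nums (i : Int) = PySem.List.pyGet? x left := by
        rw [hget, ha, haeq]
      rw [if_pos ⟨heq, trivial⟩, hcast,
        go_10 nums left right x b hb fuel (i + 1) (i : Int) (by omega) (by omega) (by push_cast; omega)]
      have hfa : ffrom nums a i = (i : Int) := ffrom_hit nums a i hi haeq
      rw [hfa]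
      congr 1
      unfold clagF
      rw [hfa]
      by_cases hab : a = b
      · subst hab
        rw [if_pos rfl, if_pos (by omega)]
        simp
      · rw [if_neg hab, ffrom_miss nums b i hi (by rw [haeq]; exact hab)]
    · have h2 : ¬ (PySem.List.pyGet? nums (i : Int) = PySem.List.pyGet? x left ∧ True) := by
        rintro ⟨h, -⟩
        rw [hget, ha] at h
        exact haeq (by simpa using h)
      rw [if_neg h2]
      by_cases hbeq : nums[i] = b
      · have heq : PySem.List.pyGet? nums (i : Int) = PySem.List.pyGet? x right := by
          rw [hget, hb, hbeq]
        rw [if_pos ⟨heq, trivial⟩, hcast,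
          go_01 nums left right x a ha fuel (i + 1) (i : Int) (by omega) (by omega) (by push_cast; omega)]
        have hab : a ≠ b := by
          intro h
          exact haeq (h ▸ hbeq)
        have hcl : clagF nums a b i = (i : Int) := by
          unfold clagF
          rw [if_neg hab, ffrom_hit nums b i hi hbeq]
        rw [hcl, ffrom_miss nums a i hi haeq]
      · have h3 : ¬ (PySem.List.pyGet? nums (i : Int) = PySem.List.pyGet? x right ∧ True) := by
          rintro ⟨h, -⟩
          rw [hget, hb] at h
          exact hbeq (by simpa using h)
        rw [if_neg h3, hcast, ih (i + 1) (by omega), ffrom_miss nums a i hi haeq]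
        congr 1
        unfold clagF
        rw [ffrom_miss nums a i hi haeq]
        by_cases hab : a = b
        · rw [if_pos hab, if_pos hab]
        · rw [if_neg hab, if_neg hab, ffrom_miss nums b i hi hbeq]

-- B's 'if flag = clag then None else (min, max)' is A's trailing if/elif/None
lemma minmax_fin (f c : Int) :
    (if f = c then (none : Option (Int × Int)) else some (min f c, max f c)) = indexiFin f c := by
  unfold indexiFin
  rcases lt_trichotomy f c with h | h | h
  · rw [if_neg (by omega), if_pos h, min_eq_left h.le, max_eq_right h.le]
  · simp [h]
  · rw [if_neg (by omega), if_neg (by omega), if_pos h, min_eq_right h.le, max_eq_left h.le]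

-- ===== VERDICT (by name: the statement is the Claim_ definition above) =====
theorem indexi_spec : Claim_equal_indexi := by
  intro nums left right x _ hpre
  unfold Spec_indexi indexi indexi_alt
  by_cases hnil : nums = []
  · subst hnil
    simp [indexiGo, indexiFin]
  · rcases hpre with h | ⟨hl, hr⟩
    · exact absurd h hnil
    obtain ⟨a, ha⟩ : ∃ a, PySem.List.pyGet? x left = some a := by
      cases h : PySem.List.pyGet? x left
      · exact absurd ((PySem.List.pyGet?_eq_none_iff x left).mp h) (by simpa using hl)
      · exact ⟨_, rfl⟩
    obtain ⟨b, hb⟩ : ∃ b, PySem.List.pyGet? x right = some b := by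
      cases h : PySem.List.pyGet? x right
      · exact absurd ((PySem.List.pyGet?_eq_none_iff x right).mp h) (by simpa using hr)
      · exact ⟨_, rfl⟩
    have h0 : indexiGo nums left right x nums.length 0 0 0 (-1) (-1)
        = indexiFin (ffrom nums a 0) (clagF nums a b 0) := by
      have h := go_00 nums left right x a b ha hb nums.length 0 (by omega)
      simpa using h
    rw [h0, if_neg hnil, ha, hb]
    simp only [idxOrNeg_eq_ffrom_zero]
    set F := ffrom nums a 0 with hF
    have hclag :
        (if a = b then
          (if F ≥ 0 ∧ a ∈ PySem.List.slice nums (some (F + 1)) none then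
             F + 1 + ffrom (PySem.List.slice nums (some (F + 1)) none) a 0
           else -1)
         else ffrom nums b 0) = clagF nums a b 0 := by
      unfold clagF
      rw [← hF]
      by_cases hab : a = b
      · rw [if_pos hab, if_pos hab]
        by_cases hFpos : 0 ≤ F
        · have hne1 : -1 ≤ F := by omega
          have hslice : PySem.List.slice nums (some (F + 1)) none = nums.drop (F.toNat + 1) := by
            have h01 : (0 : Int) ≤ F + 1 := by omega
            simp only [PySem.List.slice_from nums h01]
            congr 1
            omega
          rw [hslice]
          cases hidx : PySem.List.index? (nums.drop (F.toNat + 1)) a with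
          | none =>
            have hnotmem : a ∉ nums.drop (F.toNat + 1) := (PySem.List.index?_eq_none_iff _ _).mp hidx
            rw [if_neg (by rintro ⟨-, hmem⟩; exact hnotmem hmem), if_pos hFpos]
            unfold ffrom
            rw [hidx]
          | some m =>
            have hmem : a ∈ nums.drop (F.toNat + 1) :=
              (PySem.List.index?_isSome_iff _ _).mp (by rw [hidx]; rfl)
            rw [if_pos ⟨by omega, hmem⟩, if_pos hFpos]
            unfold ffrom
            rw [List.drop_zero, hidx]
            push_cast
            omega
        · rw [if_neg (by rintro ⟨hge, -⟩; omega), if_neg hFpos]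
      · rw [if_neg hab, if_neg hab]
    rw [hclag]
    exact (minmax_fin F (clagF nums a b 0)).symm
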